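-- pv_equiv track=rewrite | github.com/mattchrlw/advent-of-code-2021 | day/10.py | part2
-- ===== SOURCE A (Python) =====
-- def part2(text):
--     rtl = {")": "(", "]": "[", "}": "{", ">": "<"}
--     ltr = {v:k for k, v in rtl.items()}
--     values = {")": 1, "]": 2, "}": 3, ">": 4}
--     corrupted = []
--     lines = text.split("\n")
--     for l in lines:
--         punctuation = []
--         for c in l:
--             if c in ["(", "[", "{", "<"]:
--                 punctuation.append(c)
--             else:
--                 if rtl[c] == punctuation[-1]:
--                     punctuation.pop()
--                 else:
--                     corrupted.append(l)
--     lines = [l for l in lines if l not in corrupted]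
--     scores = []
--     for l in lines:
--         punctuation = []
--         for c in l:
--             if c in ["(", "[", "{", "<"]:
--                 punctuation.append(c)
--             else:
--                 if rtl[c] == punctuation[-1]:
--                     punctuation.pop()
--         new_scores = [values[ltr[i]] for i in list(reversed(punctuation))]
--         new_score = 0
--         for n in new_scores:
--             new_score = 5 * new_score + n
--         scores.append(new_score)
--     return sorted(scores)[len(scores) // 2]
-- ===== SOURCE B (Python) =====
-- def part2(text):
--     pairs = {")": "(", "]": "[", "}": "{", ">": "<"}
--     vals = {"(": 1, "[": 2, "{": 3, "<": 4}
--     scores = []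
--     for line in text.split("\n"):
--         stack = []
--         ok = True
--         for c in line:
--             if c in pairs:
--                 if stack and stack[-1] == pairs[c]:
--                     stack.pop()
--                 else:
--                     ok = False
--             else:
--                 stack.append(c)
--         if ok:
--             score = 0
--             while stack:
--                 score = 5 * score + vals[stack.pop()]
--             scores.append(score)
--     scores.sort()
--     return scores[len(scores) // 2]
-- ===== Notes on version B (the rewrite author's own statement) =====
-- stated objective: alternative
-- what changed: B replaces A's two passes over the lines plus a value-based 'l not in corrupted' filter by a single pass that parses each line once with a corrupted flag and folds the leftover stack into its score immediately, so the corrupted list, the membership filter and the second scan disappear.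
import Mathlib
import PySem

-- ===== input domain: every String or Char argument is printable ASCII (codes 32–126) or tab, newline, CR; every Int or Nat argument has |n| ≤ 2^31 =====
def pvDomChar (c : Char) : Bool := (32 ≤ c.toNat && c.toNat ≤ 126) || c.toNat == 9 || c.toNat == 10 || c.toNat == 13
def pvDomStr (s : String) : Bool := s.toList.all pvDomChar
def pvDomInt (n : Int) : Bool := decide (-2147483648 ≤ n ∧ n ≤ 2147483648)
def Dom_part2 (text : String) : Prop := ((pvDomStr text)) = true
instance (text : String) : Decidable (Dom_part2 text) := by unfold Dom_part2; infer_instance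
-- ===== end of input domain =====

-- B merges A's two passes over the lines into one stack parse per line (no `corrupted` list, no
-- value-based filter, no second scan): alternative decomposition, and it removes A's O(|lines|·|corrupted|)
-- membership filter.

-- ===== PORT A =====
-- Lines are handled as List Char (text.split("\n") = Chars.splitOn); the stack `punctuation` is stored
-- top-first (Python append/[-1]/pop at the END = cons/head/tail here), so list(reversed(punctuation))
-- is the stored order.
def pvA_rtl : PySem.Dict Char Char := PySem.Dict.ofList [(')', '('), (']', '['), ('}', '{'), ('>', '<')]
def pvA_ltr : PySem.Dict Char Char := PySem.Dict.ofList [('(', ')'), ('[', ']'), ('{', '}'), ('<', '>')]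
def pvA_values : PySem.Dict Char Int := PySem.Dict.ofList [(')', 1), (']', 2), ('}', 3), ('>', 4)]
def pvA_openers : List Char := ['(', '[', '{', '<']

-- one step of A's first loop; state = (punctuation, corrupted).  rtl[c] (KeyError) and
-- punctuation[-1] (IndexError) get the junk default ' ' — those inputs are excluded by Pre_part2.
def pvA_step1 (l : List Char) (st : List Char × List (List Char)) (c : Char) :
    List Char × List (List Char) :=
  if pvA_openers.contains c then (c :: st.1, st.2)
  else if pvA_rtl.getD c ' ' = st.1.headD ' ' then (st.1.tail, st.2)
  else (st.1, st.2 ++ [l])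

-- one step of A's second loop (same stack updates, no corrupted bookkeeping)
def pvA_step2 (st : List Char) (c : Char) : List Char :=
  if pvA_openers.contains c then c :: st
  else if pvA_rtl.getD c ' ' = st.headD ' ' then st.tail
  else st

def pvA_score (l : List Char) : Int :=
  let punctuation := l.foldl pvA_step2 []
  let new_scores := punctuation.map (fun i => pvA_values.getD (pvA_ltr.getD i ' ') 0)
  new_scores.foldl (fun s n => 5 * s + n) 0

def part2 (text : String) : Int :=
  let lines := PySem.Chars.splitOn text.toList ['\n']
  let corrupted := lines.foldl (fun cor l => (l.foldl (pvA_step1 l) ([], cor)).2) []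
  let lines2 := lines.filter (fun l => !(corrupted.contains l))
  let scores := lines2.map pvA_score
  -- sorted(scores)[len(scores) // 2]; the IndexError case (scores == []) is excluded by Pre_part2
  (PySem.List.pyGet? (PySem.List.sorted scores (fun x => x) false)
      (PySem.Int.floordiv scores.length 2)).getD 0

-- ===== PORT B =====
-- `c in pairs` + `pairs[c]` ported together as an Option-valued lookup
def pvB_pair? (c : Char) : Option Char :=
  if c = ')' then some '(' else if c = ']' then some '[' else if c = '}' then some '{'
  else if c = '>' then some '<' else none

-- vals[c]; 0 stands in for the KeyError case, which Pre_part2 excludes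
def pvB_val (c : Char) : Int :=
  if c = '(' then 1 else if c = '[' then 2 else if c = '{' then 3 else if c = '<' then 4 else 0

-- one step of B's single parse; state = (stack, ok); stack top-first as in port A
def pvB_step (st : List Char × Bool) (c : Char) : List Char × Bool :=
  match pvB_pair? c with
  | some o => if st.1.head? = some o then (st.1.tail, st.2) else (st.1, false)
  | none => (c :: st.1, st.2)

-- `while stack: score = 5 * score + vals[stack.pop()]` (pop takes the top, i.e. our head)
def pvB_complete (st : List Char) : Int := st.foldl (fun s c => 5 * s + pvB_val c) 0

def part2_alt (text : String) : Int :=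
  let scores := (PySem.Chars.splitOn text.toList ['\n']).foldl
    (fun scores l =>
      let r := l.foldl pvB_step ([], true)
      if r.2 then scores ++ [pvB_complete r.1] else scores) []
  (PySem.List.pyGet? (PySem.List.sorted scores (fun x => x) false)
      (PySem.Int.floordiv scores.length 2)).getD 0

-- ===== PRECONDITION & SPEC =====
-- the opener matching a closer (helper of Pre_part2 only)
def pvMatch (c : Char) : Char :=
  if c = ')' then '(' else if c = ']' then '[' else if c = '}' then '{' else '<'

-- pvSafe l st: scanning l from stack st, every char is a bracket and no closer ever arrives on an
-- empty stack — exactly the lines on which A's loop raises no KeyError/IndexError.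
def pvSafe : List Char → List Char → Bool
  | [], _ => true
  | c :: rest, st =>
    if c = '(' || c = '[' || c = '{' || c = '<' then pvSafe rest (c :: st)
    else if c = ')' || c = ']' || c = '}' || c = '>' then
      match st with
      | [] => false
      | t :: st' => if t = pvMatch c then pvSafe rest st' else pvSafe rest st
    else false

-- pvClean l st: additionally every closer matches the top — the lines A never marks corrupted.
def pvClean : List Char → List Char → Bool
  | [], _ => true
  | c :: rest, st =>
    if c = '(' || c = '[' || c = '{' || c = '<' then pvClean rest (c :: st)
    else
      match st with
      | [] => false
      | t :: st' => if t = pvMatch c then pvClean rest st' else false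

-- Pre_part2 = exactly the inputs on which Python A returns: every line is safe (else rtl[c] raises
-- KeyError on a non-bracket char or punctuation[-1] raises IndexError on an empty stack), and at
-- least one line is uncorrupted (else scores == [] and sorted(scores)[0] raises IndexError).
def Pre_part2 (text : String) : Prop :=
  (((PySem.Chars.splitOn text.toList ['\n']).all (fun l => pvSafe l []))
    && ((PySem.Chars.splitOn text.toList ['\n']).any (fun l => pvClean l []))) = true

instance (text : String) : Decidable (Pre_part2 text) := by unfold Pre_part2; infer_instance

def pvWitness_part2 : String := "<()>\n(]"

def Spec_part2 (text : String) (out : Int) : Prop := out = part2_alt text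
instance (text : String) (out : Int) : Decidable (Spec_part2 text out) := by
  unfold Spec_part2; infer_instance

-- ===== CLAIM (what is proved, stated in full; the proofs are below) =====
def Claim_equal_part2 : Prop :=
  ∀ (text : String), Dom_part2 text → Pre_part2 text → Spec_part2 text (part2 text)

-- ===== LEMMAS AND PROOFS =====


-- A's corrupted component only grows along the fold
theorem pvA_fold1_snd_factor (l : List Char) (st : List Char) (cor : List (List Char))
    (s : List Char) :
    (List.foldl (pvA_step1 s) (st, cor) l).2 = cor ++ (List.foldl (pvA_step1 s) (st, []) l).2 := by
  induction l generalizing st cor with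
  | nil => simp
  | cons c rest ih =>
    simp only [List.foldl_cons, pvA_step1]
    split_ifs
    · exact ih _ _
    · exact ih _ _
    · rw [ih st (cor ++ [s]), ih st ([] ++ [s])]
      simp

theorem pvA_fold1_snd_mem (l : List Char) (st : List Char) (cor : List (List Char))
    (s m : List Char) (hm : m ∈ (List.foldl (pvA_step1 s) (st, cor) l).2) : m ∈ cor ∨ m = s := by
  induction l generalizing st cor with
  | nil => exact Or.inl hm
  | cons c rest ih =>
    simp only [List.foldl_cons, pvA_step1] at hm
    split_ifs at hm
    · exact ih _ _ hm
    · exact ih _ _ hm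
    · rcases ih _ _ hm with h | h
      · rcases List.mem_append.1 h with h | h
        · exact Or.inl h
        · exact Or.inr (List.mem_singleton.1 h)
      · exact Or.inr h

-- under pvSafe, B's single parse computes A's stack and the ok-flag is pvClean
theorem pvB_fold_eq (l : List Char) (st : List Char) (b : Bool) (hs : pvSafe l st = true) :
    List.foldl pvB_step (st, b) l = (List.foldl pvA_step2 st l, b && pvClean l st) := by
  induction l generalizing st b with
  | nil => simp [pvClean]
  | cons c rest ih =>
    simp only [pvSafe] at hs
    simp only [List.foldl_cons]
    by_cases h1 : (c = '(' || c = '[' || c = '{' || c = '<') = true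
    · rw [if_pos h1] at hs
      have hB : pvB_step (st, b) c = (c :: st, b) := by
        rcases (by simpa [or_assoc] using h1 : c = '(' ∨ c = '[' ∨ c = '{' ∨ c = '<') with h | h | h | h <;>
          subst h <;> rfl
      have hA : pvA_step2 st c = c :: st := by
        rcases (by simpa [or_assoc] using h1 : c = '(' ∨ c = '[' ∨ c = '{' ∨ c = '<') with h | h | h | h <;>
          subst h <;> rfl
      rw [hB, hA, ih _ _ hs]
      have : pvClean (c :: rest) st = pvClean rest (c :: st) := by
        simp only [pvClean]; rw [if_pos h1]
      rw [this]
    · by_cases h2 : (c = ')' || c = ']' || c = '}' || c = '>') = true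
      · rw [if_neg h1, if_pos h2] at hs
        cases st with
        | nil => exact Bool.noConfusion hs
        | cons t st' =>
          change (if t = pvMatch c then pvSafe rest st' else pvSafe rest (t :: st')) = true at hs
          have hcln : pvClean (c :: rest) (t :: st')
              = if t = pvMatch c then pvClean rest st' else false := by
            simp only [pvClean]; rw [if_neg h1]
          by_cases hm : t = pvMatch c
          · rw [if_pos hm] at hs
            have hB : pvB_step (t :: st', b) c = (st', b) := by
              rcases (by simpa [or_assoc] using h2 : c = ')' ∨ c = ']' ∨ c = '}' ∨ c = '>') with h | h | h | h <;>
                subst h <;> simp_all [pvB_step, pvB_pair?, pvMatch]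
            have hA : pvA_step2 (t :: st') c = st' := by
              rcases (by simpa [or_assoc] using h2 : c = ')' ∨ c = ']' ∨ c = '}' ∨ c = '>') with h | h | h | h <;>
                subst h <;> simp_all [pvA_step2, pvA_openers, pvA_rtl, pvMatch] <;> decide
            rw [hB, hA, ih _ _ hs, hcln, if_pos hm]
          · rw [if_neg hm] at hs
            have hpair : pvB_pair? c = some (pvMatch c) := by
              rcases (by simpa [or_assoc] using h2 : c = ')' ∨ c = ']' ∨ c = '}' ∨ c = '>') with h | h | h | h <;>
                subst h <;> decide
            have hgd : pvA_rtl.getD c ' ' = pvMatch c := by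
              rcases (by simpa [or_assoc] using h2 : c = ')' ∨ c = ']' ∨ c = '}' ∨ c = '>') with h | h | h | h <;>
                subst h <;> decide
            have hopn : pvA_openers.contains c = false := by
              rcases (by simpa [or_assoc] using h2 : c = ')' ∨ c = ']' ∨ c = '}' ∨ c = '>') with h | h | h | h <;>
                subst h <;> decide
            have hB : pvB_step (t :: st', b) c = (t :: st', false) := by
              simp only [pvB_step, hpair, List.head?_cons]
              rw [if_neg (by simp [hm])]
            have hA : pvA_step2 (t :: st') c = t :: st' := by
              simp only [pvA_step2, hopn, Bool.false_eq_true, if_false, hgd, List.headD_cons]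
              rw [if_neg (fun hh => hm hh.symm)]
            rw [hB, hA, ih _ _ hs, hcln, if_neg hm]
            simp
      · rw [if_neg h1, if_neg h2] at hs
        exact absurd hs (by simp)

-- under pvSafe, A's first pass marks the line corrupted exactly when pvClean fails
theorem pvA_corrupt_iff (l : List Char) (st : List Char) (s : List Char)
    (hs : pvSafe l st = true) :
    ((List.foldl (pvA_step1 s) (st, []) l).2 = [] ↔ pvClean l st = true) := by
  induction l generalizing st with
  | nil => simp [pvClean]
  | cons c rest ih =>
    simp only [pvSafe] at hs
    simp only [List.foldl_cons]
    by_cases h1 : (c = '(' || c = '[' || c = '{' || c = '<') = true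
    · rw [if_pos h1] at hs
      have hA : pvA_step1 s (st, ([] : List (List Char))) c = (c :: st, []) := by
        rcases (by simpa [or_assoc] using h1 : c = '(' ∨ c = '[' ∨ c = '{' ∨ c = '<') with h | h | h | h <;>
          subst h <;> rfl
      rw [hA]
      have : pvClean (c :: rest) st = pvClean rest (c :: st) := by
        simp only [pvClean]; rw [if_pos h1]
      rw [this]; exact ih _ hs
    · by_cases h2 : (c = ')' || c = ']' || c = '}' || c = '>') = true
      · rw [if_neg h1, if_pos h2] at hs
        cases st with
        | nil => exact Bool.noConfusion hs
        | cons t st' =>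
          change (if t = pvMatch c then pvSafe rest st' else pvSafe rest (t :: st')) = true at hs
          have hcln : pvClean (c :: rest) (t :: st')
              = if t = pvMatch c then pvClean rest st' else false := by
            simp only [pvClean]; rw [if_neg h1]
          by_cases hm : t = pvMatch c
          · rw [if_pos hm] at hs
            have hA : pvA_step1 s (t :: st', ([] : List (List Char))) c = (st', []) := by
              rcases (by simpa [or_assoc] using h2 : c = ')' ∨ c = ']' ∨ c = '}' ∨ c = '>') with h | h | h | h <;>
                subst h <;> simp_all [pvA_step1, pvA_openers, pvA_rtl, pvMatch] <;> decide
            rw [hA, hcln, if_pos hm]; exact ih _ hs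
          · rw [if_neg hm] at hs
            have hgd : pvA_rtl.getD c ' ' = pvMatch c := by
              rcases (by simpa [or_assoc] using h2 : c = ')' ∨ c = ']' ∨ c = '}' ∨ c = '>') with h | h | h | h <;>
                subst h <;> decide
            have hopn : pvA_openers.contains c = false := by
              rcases (by simpa [or_assoc] using h2 : c = ')' ∨ c = ']' ∨ c = '}' ∨ c = '>') with h | h | h | h <;>
                subst h <;> decide
            have hA : pvA_step1 s (t :: st', ([] : List (List Char))) c = (t :: st', [s]) := by
              simp only [pvA_step1, hopn, Bool.false_eq_true, if_false, hgd, List.headD_cons]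
              rw [if_neg (fun hh => hm hh.symm)]
              simp
            rw [hA, hcln, if_neg hm]
            constructor
            · intro h
              rw [pvA_fold1_snd_factor] at h
              simp at h
            · intro h; exact absurd h (by simp)
      · rw [if_neg h1, if_neg h2] at hs
        exact absurd hs (by simp)

-- the stack only ever holds openers
theorem pvA_stack_openers (l : List Char) (st : List Char)
    (hst : ∀ x ∈ st, x ∈ pvA_openers) :
    ∀ x ∈ List.foldl pvA_step2 st l, x ∈ pvA_openers := by
  induction l generalizing st with
  | nil => exact hst
  | cons c rest ih =>
    simp only [List.foldl_cons, pvA_step2]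
    split_ifs with hc _
    · refine ih _ ?_
      intro x hx
      rcases List.mem_cons.1 hx with h | h
      · subst h; simpa using hc
      · exact hst _ h
    · exact ih _ fun x hx => hst _ (List.mem_of_mem_tail hx)
    · exact ih _ hst

-- A's completion score of a stack of openers is B's
theorem pvA_score_eq (l : List Char) :
    pvA_score l = pvB_complete (List.foldl pvA_step2 [] l) := by
  have hop := pvA_stack_openers l [] (by simp)
  simp only [pvA_score, pvB_complete, List.foldl_map]
  apply PySem.List.foldl_congr_mem
  intro acc x hx
  have hxo := hop x hx
  simp only [pvA_openers, List.mem_cons, List.not_mem_nil, or_false] at hxo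
  rcases hxo with h | h | h | h <;> subst h <;> rfl

-- membership in A's accumulated corrupted list, given all lines safe
theorem pvA_mem_corrupted (lines : List (List Char)) (cor0 : List (List Char))
    (hsafe : ∀ l ∈ lines, pvSafe l [] = true) (m : List Char) :
    m ∈ lines.foldl (fun cor l => (l.foldl (pvA_step1 l) ([], cor)).2) cor0
      ↔ m ∈ cor0 ∨ ∃ l ∈ lines, m = l ∧ ¬ pvClean l [] = true := by
  induction lines generalizing cor0 with
  | nil => simp
  | cons l ls ih =>
    simp only [List.foldl_cons]
    rw [ih _ (fun x hx => hsafe x (List.mem_cons_of_mem _ hx))]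
    rw [pvA_fold1_snd_factor]
    constructor
    · rintro (hm | h)
      · rcases List.mem_append.1 hm with h | h
        · exact Or.inl h
        · have hml : m = l := by
            rcases pvA_fold1_snd_mem _ _ _ _ _ h with h' | h'
            · simp at h'
            · exact h'
          subst hml
          refine Or.inr ⟨m, List.mem_cons_self .., rfl, ?_⟩
          intro hcln
          rw [(pvA_corrupt_iff _ _ _ (hsafe _ (List.mem_cons_self ..))).2 hcln] at h
          simp at h
      · rcases h with ⟨x, hx, hmx, hcln⟩
        exact Or.inr ⟨x, List.mem_cons_of_mem _ hx, hmx, hcln⟩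
    · rintro (hm | ⟨x, hx, hmx, hcln⟩)
      · exact Or.inl (List.mem_append.2 (Or.inl hm))
      · rcases List.mem_cons.1 hx with hxl | hxl
        · rw [hxl] at hcln hmx
          left
          refine List.mem_append.2 (Or.inr ?_)
          rw [hmx]
          have hne : (List.foldl (pvA_step1 l) (([] : List Char), ([] : List (List Char))) l).2 ≠ [] :=
            fun h => hcln ((pvA_corrupt_iff _ _ _ (hsafe _ (by simp))).1 h)
          rcases List.exists_mem_of_ne_nil _ hne with ⟨y, hy⟩
          rcases pvA_fold1_snd_mem _ _ _ _ _ hy with h' | h'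
          · simp at h'
          · rwa [h'] at hy
        · exact Or.inr ⟨x, hxl, hmx, hcln⟩



-- ===== VERDICT (by name: the statement is the Claim_ definition above) =====
theorem part2_spec : Claim_equal_part2 := by
  intro text _hdom hpre
  unfold Spec_part2 part2 part2_alt
  dsimp only
  rcases Bool.and_eq_true_iff.1 hpre with ⟨hall, _hany⟩
  have hsafe : ∀ l ∈ PySem.Chars.splitOn text.toList ['\n'], pvSafe l [] = true := by
    simpa using List.all_eq_true.1 hall
  set lines := PySem.Chars.splitOn text.toList ['\n'] with hlines
  have hB : lines.foldl
      (fun scores l =>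
        let r := l.foldl pvB_step ([], true)
        if r.2 then scores ++ [pvB_complete r.1] else scores) []
      = (lines.filter fun l => (l.foldl pvB_step ([], true)).2).map
          (fun l => pvB_complete (l.foldl pvB_step ([], true)).1) := by
    simpa using PySem.List.foldl_append_if
      (fun l => (l.foldl pvB_step (([] : List Char), true)).2)
      (fun l => pvB_complete (l.foldl pvB_step (([] : List Char), true)).1) lines []
  rw [hB]
  have hfcong : lines.filter
      (fun l => !(lines.foldl (fun cor l => (l.foldl (pvA_step1 l) ([], cor)).2) []).contains l)
      = lines.filter (fun l => (l.foldl pvB_step ([], true)).2) := by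
    refine List.filter_congr ?_
    intro l hl
    rw [pvB_fold_eq _ _ _ (hsafe _ hl)]
    simp only [Bool.true_and]
    have hmem := pvA_mem_corrupted lines [] hsafe l
    by_cases hcln : pvClean l [] = true
    · rw [hcln]
      simp only [Bool.not_eq_eq_eq_not, Bool.not_true, List.contains_eq_mem,
        decide_eq_false_iff_not]
      rw [hmem]
      rintro (h | ⟨x, _, rfl, hx⟩)
      · simp at h
      · exact hx hcln
    · rw [Bool.eq_false_iff.2 hcln]
      simp only [Bool.not_eq_eq_eq_not, Bool.not_false, List.contains_eq_mem, decide_eq_true_eq]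
      rw [hmem]
      exact Or.inr ⟨l, hl, rfl, hcln⟩
  have hmcong : (lines.filter (fun l => (l.foldl pvB_step ([], true)).2)).map pvA_score
      = (lines.filter (fun l => (l.foldl pvB_step ([], true)).2)).map
          (fun l => pvB_complete (l.foldl pvB_step ([], true)).1) := by
    refine List.map_congr_left ?_
    intro l hl
    rw [pvB_fold_eq _ _ _ (hsafe _ (List.mem_of_mem_filter hl))]
    exact pvA_score_eq l
  rw [hfcong, hmcong]
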